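-- pv_equiv track=rewrite | github.com/Ralf-Kemmann/Quantum-Spacetime-Bridge | scripts/run_bms_fu02g4b_exhaustive_connected_patch_signature_check.py | role_adjacency_counts
-- ===== SOURCE A (Python) =====
-- from typing import Any, Dict, FrozenSet, Iterable, Iterator, List, Set, Tuple
--
-- def role_adjacency_counts(mixed: Set[str], pent: Set[str], adj: Dict[str, Set[str]]) -> Tuple[int, int, int]:
--     role = {n: "mixed" for n in mixed}
--     role.update({n: "pentagon_boundary" for n in pent})
--     seen = set()
--     mixed_internal = 0
--     pent_internal = 0
--     cross = 0
--     for a in role: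
--         for b in adj.get(a, set()):
--             if b not in role:
--                 continue
--             pair = tuple(sorted((a, b)))
--             if pair in seen:
--                 continue
--             seen.add(pair)
--             if role[a] == role[b] == "mixed":
--                 mixed_internal += 1
--             elif role[a] == role[b] == "pentagon_boundary":
--                 pent_internal += 1
--             else:
--                 cross += 1
--     return mixed_internal, pent_internal, cross
-- ===== SOURCE B (Python) =====
-- from typing import Dict, Set, Tuple
--
-- def role_adjacency_counts(mixed: Set[str], pent: Set[str], adj: Dict[str, Set[str]]) -> Tuple[int, int, int]:
--     # Brute-force pair enumeration: instead of scanning adjacency lists and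
--     # deduplicating sorted pairs with a 'seen' set, enumerate each unordered
--     # pair of role nodes exactly once (sorted node list, j >= i, so no dedup
--     # structure is needed) and test adjacency in either direction by membership.
--     nodes = sorted(set(mixed) | set(pent))
--     pset = set(pent)
--     mixed_internal = pent_internal = cross = 0
--     for i, x in enumerate(nodes):
--         for y in nodes[i:]:
--             if y in adj.get(x, set()) or x in adj.get(y, set()):
--                 if x in pset and y in pset:
--                     pent_internal += 1
--                 elif x not in pset and y not in pset:
--                     mixed_internal += 1
--                 else:
--                     cross += 1
--     return mixed_internal, pent_internal, cross
-- ===== Notes on version B (the rewrite author's own statement) =====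
-- stated objective: alternative
-- what changed: A scans adjacency lists from each role node and deduplicates undirected edges with a growing 'seen' set; B never deduplicates: it sorts the role-node list and enumerates every unordered pair (x, y) with x <= y exactly once, testing adjacency in either direction by membership, so the traversal is over node pairs instead of over adjacency entries.
import Mathlib
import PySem

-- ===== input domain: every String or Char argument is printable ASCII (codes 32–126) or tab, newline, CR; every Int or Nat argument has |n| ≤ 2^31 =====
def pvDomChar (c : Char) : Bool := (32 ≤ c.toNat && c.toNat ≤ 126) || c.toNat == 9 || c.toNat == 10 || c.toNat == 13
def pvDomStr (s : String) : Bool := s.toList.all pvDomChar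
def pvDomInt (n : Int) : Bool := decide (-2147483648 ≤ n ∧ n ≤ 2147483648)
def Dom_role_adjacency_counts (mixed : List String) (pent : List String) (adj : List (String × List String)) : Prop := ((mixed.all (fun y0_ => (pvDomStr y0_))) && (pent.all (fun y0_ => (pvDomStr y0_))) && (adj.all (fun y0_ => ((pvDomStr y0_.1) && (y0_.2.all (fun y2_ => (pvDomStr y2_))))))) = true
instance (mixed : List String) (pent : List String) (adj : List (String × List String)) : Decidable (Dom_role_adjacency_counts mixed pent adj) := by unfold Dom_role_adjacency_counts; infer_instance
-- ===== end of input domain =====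

-- B replaces A's adjacency-scan with a 'seen' dedup set by brute-force enumeration of
-- each unordered pair of role nodes exactly once (sorted node list, second index ≥ first),
-- testing adjacency in either direction by membership (objective: alternative).


-- ===== PORT A =====
-- tuple(sorted((a, b))) on two strings (exact: Lean's String ≤ is code-point lexicographic, as Python's)
def pvPairKey (a b : String) : String × String := if a ≤ b then (a, b) else (b, a)

-- literal port of A: role dict built by insertion (pent overwrites), then the nested
-- loop with a 'seen' set deduplicating sorted pairs and an if/elif/else classification.
-- role[a] / role[b] are ported as getD with default "" (both keys are always present).
def role_adjacency_counts (mixed : List String) (pent : List String) (adj : List (String × List String)) : Int × Int × Int :=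
  let adjD : PySem.Dict String (List String) := PySem.Dict.mk adj
  let role : PySem.Dict String String :=
    List.foldl (fun d n => d.insert n "pentagon_boundary")
      (List.foldl (fun d n => d.insert n "mixed") PySem.Dict.empty mixed) pent
  let st :=
    List.foldl (fun st a =>
      List.foldl (fun (st : PySem.Set (String × String) × Int × Int × Int) b =>
        if role.contains b then
          let pair := pvPairKey a b
          if pair ∈ st.1 then st
          else
            let seen := st.1.add pair
            if role.getD a "" = "mixed" ∧ role.getD b "" = "mixed" then
              (seen, st.2.1 + 1, st.2.2.1, st.2.2.2)
            else if role.getD a "" = "pentagon_boundary" ∧ role.getD b "" = "pentagon_boundary" then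
              (seen, st.2.1, st.2.2.1 + 1, st.2.2.2)
            else
              (seen, st.2.1, st.2.2.1, st.2.2.2 + 1)
        else st) st (adjD.getD a []))
      (([], 0, 0, 0) : PySem.Set (String × String) × Int × Int × Int) role.keys
  (st.2.1, st.2.2.1, st.2.2.2)

-- ===== PORT B =====
-- literal port of B: sorted node list, outer enumerate, inner loop over nodes[i:],
-- adjacency tested in either direction by membership, three counters, no dedup set.
def role_adjacency_counts_alt (mixed : List String) (pent : List String) (adj : List (String × List String)) : Int × Int × Int :=
  let adjD : PySem.Dict String (List String) := PySem.Dict.mk adj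
  let nodes : List String :=
    PySem.List.sorted ((PySem.Set.ofList mixed).union (PySem.Set.ofList pent)) (fun s => s) false
  let pset : PySem.Set String := PySem.Set.ofList pent
  List.foldl (fun st (p : Int × String) =>
    List.foldl (fun (st : Int × Int × Int) y =>
      if y ∈ adjD.getD p.2 [] ∨ p.2 ∈ adjD.getD y [] then
        if p.2 ∈ pset ∧ y ∈ pset then (st.1, st.2.1 + 1, st.2.2)
        else if p.2 ∉ pset ∧ y ∉ pset then (st.1 + 1, st.2.1, st.2.2)
        else (st.1, st.2.1, st.2.2 + 1)
      else st) st (PySem.List.slice nodes (some p.1) none))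
    ((0, 0, 0) : Int × Int × Int) (PySem.List.enumerate nodes)

-- ===== PRECONDITION & SPEC =====
def Spec_role_adjacency_counts (mixed : List String) (pent : List String) (adj : List (String × List String)) (out : Int × Int × Int) : Prop := out = role_adjacency_counts_alt mixed pent adj
instance (mixed : List String) (pent : List String) (adj : List (String × List String)) (out : Int × Int × Int) : Decidable (Spec_role_adjacency_counts mixed pent adj out) := by unfold Spec_role_adjacency_counts; infer_instance

-- ===== CLAIM (what is proved, stated in full; the proofs are below) =====
def Claim_equal_role_adjacency_counts : Prop := ∀ (mixed : List String) (pent : List String) (adj : List (String × List String)), Dom_role_adjacency_counts mixed pent adj → Spec_role_adjacency_counts mixed pent adj (role_adjacency_counts mixed pent adj)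

-- ===== LEMMAS AND PROOFS =====

-- A's classify-and-dedup step, phrased on the sorted pair alone
def pvBump (role : PySem.Dict String String)
    (st : PySem.Set (String × String) × Int × Int × Int) (e : String × String) :
    PySem.Set (String × String) × Int × Int × Int :=
  if e ∈ st.1 then st
  else
    let seen := st.1.add e
    if role.getD e.1 "" = "mixed" ∧ role.getD e.2 "" = "mixed" then
      (seen, st.2.1 + 1, st.2.2.1, st.2.2.2)
    else if role.getD e.1 "" = "pentagon_boundary" ∧ role.getD e.2 "" = "pentagon_boundary" then
      (seen, st.2.1, st.2.2.1 + 1, st.2.2.2)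
    else
      (seen, st.2.1, st.2.2.1, st.2.2.2 + 1)

-- the undirected edge list A's loop traverses
def pvEdgeList (keys : List String) (inRole : String → Bool)
    (adjD : PySem.Dict String (List String)) : List (String × String) :=
  keys.flatMap (fun a => ((adjD.getD a []).filter inRole).map (fun b => pvPairKey a b))

-- the new (not yet seen) elements a dedup loop appends, in order
def pvNew (s : PySem.Set (String × String)) :
    List (String × String) → List (String × String)
  | [] => []
  | e :: t => if e ∈ s then pvNew s t else e :: pvNew (s ++ [e]) t

-- B's classify step on one candidate pair
def pvBumpB (adjD : PySem.Dict String (List String)) (pset : PySem.Set String)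
    (st : Int × Int × Int) (e : String × String) : Int × Int × Int :=
  if e.2 ∈ adjD.getD e.1 [] ∨ e.1 ∈ adjD.getD e.2 [] then
    if e.1 ∈ pset ∧ e.2 ∈ pset then (st.1, st.2.1 + 1, st.2.2)
    else if e.1 ∉ pset ∧ e.2 ∉ pset then (st.1 + 1, st.2.1, st.2.2)
    else (st.1, st.2.1, st.2.2 + 1)
  else st

-- the candidate pair list B's double loop traverses: (nodes[i], y) for y ∈ nodes[i:]
def pvPairList (nodes : List String) : List (String × String) :=
  (PySem.List.enumerate nodes).flatMap
    (fun p => (PySem.List.slice nodes (some p.1) none).map (fun y => (p.2, y)))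

-- B's adjacency test
def pvCond (adjD : PySem.Dict String (List String)) (e : String × String) : Bool :=
  decide (e.2 ∈ adjD.getD e.1 [] ∨ e.1 ∈ adjD.getD e.2 [])

-- B's category predicates
def pvQp (pset : PySem.Set String) (e : String × String) : Bool :=
  decide (e.1 ∈ pset) && decide (e.2 ∈ pset)
def pvQm (pset : PySem.Set String) (e : String × String) : Bool :=
  !decide (e.1 ∈ pset) && !decide (e.2 ∈ pset)

lemma mem_pvNew (x : String × String) :
    ∀ (L : List (String × String)) (s : PySem.Set (String × String)),
      x ∈ pvNew s L ↔ x ∈ L ∧ x ∉ s := by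
  intro L
  induction L with
  | nil => simp [pvNew]
  | cons e t ih =>
      intro s
      by_cases he : e ∈ s
      · simp only [pvNew, if_pos he, ih, List.mem_cons]
        constructor
        · rintro ⟨hx, hs⟩; exact ⟨Or.inr hx, hs⟩
        · rintro ⟨hx | hx, hs⟩
          · exact absurd (hx ▸ he) hs
          · exact ⟨hx, hs⟩
      · simp only [pvNew, if_neg he, List.mem_cons, ih, List.mem_append,
          List.mem_singleton]
        by_cases hx : x = e
        · simp [hx, he]
        · simp [hx]; try tauto

lemma nodup_pvNew : ∀ (L : List (String × String)) (s : PySem.Set (String × String)),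
    (pvNew s L).Nodup := by
  intro L
  induction L with
  | nil => intro s; simp [pvNew]
  | cons e t ih =>
      intro s
      by_cases he : e ∈ s
      · simpa [pvNew, he] using ih s
      · simp only [pvNew, if_neg he, List.nodup_cons]
        refine ⟨fun hmem => ?_, ih _⟩
        have := (mem_pvNew e t (s ++ [e])).1 hmem
        simp at this

lemma bump_pairKey (role : PySem.Dict String String)
    (st : PySem.Set (String × String) × Int × Int × Int) (a b : String) :
    (if pvPairKey a b ∈ st.1 then st
     else
       if role.getD a "" = "mixed" ∧ role.getD b "" = "mixed" then
         (st.1.add (pvPairKey a b), st.2.1 + 1, st.2.2.1, st.2.2.2)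
       else if role.getD a "" = "pentagon_boundary" ∧ role.getD b "" = "pentagon_boundary" then
         (st.1.add (pvPairKey a b), st.2.1, st.2.2.1 + 1, st.2.2.2)
       else
         (st.1.add (pvPairKey a b), st.2.1, st.2.2.1, st.2.2.2 + 1))
    = pvBump role st (pvPairKey a b) := by
  by_cases hab : a ≤ b
  · simp [pvPairKey, pvBump, hab]
  · simp [pvPairKey, pvBump, hab, and_comm]

lemma foldl_bump (role : PySem.Dict String String) :
    ∀ (L : List (String × String)) (s : PySem.Set (String × String)) (m p c : Int),
      L.foldl (pvBump role) (s, m, p, c) =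
        (s ++ pvNew s L,
         m + (List.countP (fun e => decide (role.getD e.1 "" = "mixed" ∧ role.getD e.2 "" = "mixed")) (pvNew s L) : Int),
         p + (List.countP (fun e => decide (role.getD e.1 "" = "pentagon_boundary" ∧ role.getD e.2 "" = "pentagon_boundary")) (pvNew s L) : Int),
         c + (List.countP (fun e => !decide (role.getD e.1 "" = "mixed" ∧ role.getD e.2 "" = "mixed")
                 && !decide (role.getD e.1 "" = "pentagon_boundary" ∧ role.getD e.2 "" = "pentagon_boundary")) (pvNew s L) : Int)) := by
  intro L
  induction L with
  | nil => intro s m p c; simp [pvNew]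
  | cons e t ih =>
      intro s m p c
      by_cases he : e ∈ s
      · simp only [List.foldl_cons, pvBump, if_pos he, pvNew, ih]
      · rw [List.foldl_cons]
        have hadd : s.add e = s ++ [e] := PySem.Set.add_of_not_mem he
        by_cases h1 : role.getD e.1 "" = "mixed" ∧ role.getD e.2 "" = "mixed"
        · have h2 : ¬(role.getD e.1 "" = "pentagon_boundary" ∧
              role.getD e.2 "" = "pentagon_boundary") := by
            rintro ⟨hp1, _⟩; rw [h1.1] at hp1; exact absurd hp1 (by decide)
          have hb : pvBump role (s, m, p, c) e = (s ++ [e], m + 1, p, c) := by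
            simp [pvBump, he, h1, hadd]
          rw [hb, ih]
          simp only [pvNew, if_neg he, List.countP_cons, Prod.mk.injEq]
          refine ⟨by simp, by simp [h1, h2]; try omega,
            by simp [h1, h2]; try omega, by simp [h1, h2]; try omega⟩
        · by_cases h2 : role.getD e.1 "" = "pentagon_boundary" ∧
              role.getD e.2 "" = "pentagon_boundary"
          · have hb : pvBump role (s, m, p, c) e = (s ++ [e], m, p + 1, c) := by
              simp [pvBump, he, h1, h2, hadd]
            rw [hb, ih]
            simp only [pvNew, if_neg he, List.countP_cons, Prod.mk.injEq]
            refine ⟨by simp, by simp [h1, h2]; try omega,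
              by simp [h1, h2]; try omega, by simp [h1, h2]; try omega⟩
          · have hb : pvBump role (s, m, p, c) e = (s ++ [e], m, p, c + 1) := by
              simp [pvBump, he, h1, h2, hadd]
            rw [hb, ih]
            simp only [pvNew, if_neg he, List.countP_cons, Prod.mk.injEq]
            refine ⟨by simp, by simp [h1, h2]; try omega,
              by simp [h1, h2]; try omega, by simp [h1, h2]; try omega⟩

lemma getD_const_fold (l : List String) (v : String) :
    ∀ (d : PySem.Dict String String) (x : String) (d0 : String),
      (l.foldl (fun d n => d.insert n v) d).getD x d0 = if x ∈ l then v else d.getD x d0 := by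
  induction l with
  | nil => intro d x d0; simp
  | cons n t ih =>
      intro d x d0
      rw [List.foldl_cons, ih, PySem.Dict.getD_insert]
      by_cases ht : x ∈ t
      · simp [ht]
      · by_cases hn : x = n
        · simp [ht, hn]
        · simp [ht, hn]

lemma contains_const_fold (l : List String) (v : String) :
    ∀ (d : PySem.Dict String String) (x : String),
      ((l.foldl (fun d n => d.insert n v) d).contains x = true) ↔ (x ∈ l ∨ d.contains x = true) := by
  induction l with
  | nil => intro d x; simp
  | cons n t ih =>
      intro d x
      rw [List.foldl_cons, ih, PySem.Dict.contains_insert]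
      simp only [Bool.or_eq_true, beq_iff_eq, List.mem_cons]
      tauto

lemma mem_pvEdgeList (keys : List String) (inRole : String → Bool)
    (adjD : PySem.Dict String (List String)) (x : String × String) :
    x ∈ pvEdgeList keys inRole adjD ↔
      ∃ a, a ∈ keys ∧ ∃ b, b ∈ adjD.getD a [] ∧ inRole b = true ∧ x = pvPairKey a b := by
  simp only [pvEdgeList, List.mem_flatMap, List.mem_map, List.mem_filter]
  constructor
  · rintro ⟨a, ha, b, ⟨hb, hr⟩, hx⟩; exact ⟨a, ha, b, hb, hr, hx.symm⟩
  · rintro ⟨a, ha, b, hb, hr, hx⟩; exact ⟨a, ha, b, ⟨hb, hr⟩, hx.symm⟩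

lemma A_fold_eq (role : PySem.Dict String String) (adjD : PySem.Dict String (List String))
    (keys : List String) (init : PySem.Set (String × String) × Int × Int × Int) :
    keys.foldl (fun st a =>
      List.foldl (fun (st : PySem.Set (String × String) × Int × Int × Int) b =>
        if role.contains b then
          if pvPairKey a b ∈ st.1 then st
          else
            if role.getD a "" = "mixed" ∧ role.getD b "" = "mixed" then
              (st.1.add (pvPairKey a b), st.2.1 + 1, st.2.2.1, st.2.2.2)
            else if role.getD a "" = "pentagon_boundary" ∧ role.getD b "" = "pentagon_boundary" then
              (st.1.add (pvPairKey a b), st.2.1, st.2.2.1 + 1, st.2.2.2)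
            else
              (st.1.add (pvPairKey a b), st.2.1, st.2.2.1, st.2.2.2 + 1)
        else st) st (adjD.getD a [])) init
    = (pvEdgeList keys role.contains adjD).foldl (pvBump role) init := by
  rw [pvEdgeList, List.foldl_flatMap]
  refine PySem.List.foldl_congr_mem _ _ _ _ (fun acc a _ => ?_)
  rw [List.foldl_map, List.foldl_filter]
  refine PySem.List.foldl_congr_mem _ _ _ _ (fun st b _ => ?_)
  by_cases hc : role.contains b
  · simp only [hc, if_true]
    exact bump_pairKey role st a b
  · simp [hc]

-- B's double loop is a fold of pvBumpB over the candidate pair list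
lemma B_fold_eq (adjD : PySem.Dict String (List String)) (pset : PySem.Set String)
    (nodes : List String) (init : Int × Int × Int) :
    (PySem.List.enumerate nodes).foldl (fun st (p : Int × String) =>
      List.foldl (fun (st : Int × Int × Int) y =>
        if y ∈ adjD.getD p.2 [] ∨ p.2 ∈ adjD.getD y [] then
          if p.2 ∈ pset ∧ y ∈ pset then (st.1, st.2.1 + 1, st.2.2)
          else if p.2 ∉ pset ∧ y ∉ pset then (st.1 + 1, st.2.1, st.2.2)
          else (st.1, st.2.1, st.2.2 + 1)
        else st) st (PySem.List.slice nodes (some p.1) none)) init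
    = (pvPairList nodes).foldl (pvBumpB adjD pset) init := by
  rw [pvPairList, List.foldl_flatMap]
  refine PySem.List.foldl_congr_mem _ _ _ _ (fun acc p _ => ?_)
  rw [List.foldl_map]
  rfl

-- counting form of pvBumpB's fold
lemma foldl_bumpB (adjD : PySem.Dict String (List String)) (pset : PySem.Set String) :
    ∀ (L : List (String × String)) (m p c : Int),
      L.foldl (pvBumpB adjD pset) (m, p, c) =
        (m + (List.countP (fun e => pvCond adjD e && pvQm pset e) L : Int),
         p + (List.countP (fun e => pvCond adjD e && pvQp pset e) L : Int),
         c + (List.countP (fun e => pvCond adjD e && !pvQm pset e && !pvQp pset e) L : Int)) := by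
  intro L
  induction L with
  | nil => intro m p c; simp
  | cons e t ih =>
      intro m p c
      rw [List.foldl_cons]
      by_cases hc : e.2 ∈ adjD.getD e.1 [] ∨ e.1 ∈ adjD.getD e.2 []
      · by_cases hp : e.1 ∈ pset ∧ e.2 ∈ pset
        · have hb : pvBumpB adjD pset (m, p, c) e = (m, p + 1, c) := by
            simp [pvBumpB, hc, hp]
          rw [hb, ih]
          simp only [List.countP_cons, pvCond, pvQm, pvQp, Prod.mk.injEq]
          refine ⟨by simp [hc, hp.1, hp.2]; try omega, by simp [hc, hp.1, hp.2]; try omega,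
            by simp [hc, hp.1, hp.2]; try omega⟩
        · by_cases hm : e.1 ∉ pset ∧ e.2 ∉ pset
          · have hb : pvBumpB adjD pset (m, p, c) e = (m + 1, p, c) := by
              simp [pvBumpB, hc, hp, hm]
            rw [hb, ih]
            simp only [List.countP_cons, pvCond, pvQm, pvQp, Prod.mk.injEq]
            refine ⟨by simp [hc, hm.1, hm.2]; try omega, by simp [hc, hm.1, hm.2]; try omega,
              by simp [hc, hm.1, hm.2]; try omega⟩
          · have hb : pvBumpB adjD pset (m, p, c) e = (m, p, c + 1) := by
              simp [pvBumpB, hc, hp, hm]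
            rw [hb, ih]
            simp only [List.countP_cons, pvCond, pvQm, pvQp, Prod.mk.injEq]
            by_cases h1 : e.1 ∈ pset
            · have h2 : e.2 ∉ pset := fun h2 => hp ⟨h1, h2⟩
              refine ⟨by simp [hc, h1, h2]; try omega, by simp [hc, h1, h2]; try omega,
                by simp [hc, h1, h2]; try omega⟩
            · have h2 : e.2 ∈ pset := by
                by_contra h2; exact hm ⟨h1, h2⟩
              refine ⟨by simp [hc, h1, h2]; try omega, by simp [hc, h1, h2]; try omega,
                by simp [hc, h1, h2]; try omega⟩
      · have hb : pvBumpB adjD pset (m, p, c) e = (m, p, c) := by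
          simp [pvBumpB, hc]
        rw [hb, ih]
        simp only [List.countP_cons, pvCond, pvQm, pvQp, Prod.mk.injEq]
        refine ⟨by simp [hc], by simp [hc], by simp [hc]⟩

-- membership in B's candidate list over a strictly increasing node list
lemma mem_pvPairList (nodes : List String) (hlt : nodes.Pairwise (· < ·)) (e : String × String) :
    e ∈ pvPairList nodes ↔ e.1 ∈ nodes ∧ e.2 ∈ nodes ∧ e.1 ≤ e.2 := by
  have hget : ∀ (i j : Nat) (hi : i < nodes.length) (hj : j < nodes.length),
      i < j → nodes[i] < nodes[j] := by
    intro i j hi hj hij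
    exact List.pairwise_iff_getElem.1 hlt i j hi hj hij
  constructor
  · intro hmem
    simp only [pvPairList, List.mem_flatMap] at hmem
    obtain ⟨p, hp, hmem⟩ := hmem
    obtain ⟨k, hk, rfl⟩ := (PySem.List.mem_enumerate_iff _ _ _).1 hp
    simp only [zero_add] at hmem ⊢
    rw [PySem.List.slice_from_natCast] at hmem
    simp only [List.mem_map] at hmem
    obtain ⟨y, hy, rfl⟩ := hmem
    refine ⟨List.getElem_mem hk, List.mem_of_mem_drop hy, ?_⟩
    obtain ⟨j, hj, hj2⟩ := List.mem_iff_getElem.1 hy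
    have hjlen : k + j < nodes.length := by
      simp only [List.length_drop] at hj; omega
    have hyv : y = nodes[k + j]'hjlen := by
      rw [← hj2, List.getElem_drop]
    rcases Nat.eq_zero_or_pos j with hz | hpos
    · subst hz; rw [hyv]; simp
    · rw [hyv]
      exact le_of_lt (hget k (k + j) hk hjlen (by omega))
  · rintro ⟨h1, h2, hle⟩
    obtain ⟨k, hk, hk1⟩ := List.mem_iff_getElem.1 h1
    obtain ⟨j, hj, hj2⟩ := List.mem_iff_getElem.1 h2
    have hkj : k ≤ j := by
      by_contra hlt'
      have := hget j k hj hk (by omega)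
      rw [hk1, hj2] at this
      exact absurd hle (not_le_of_gt this)
    simp only [pvPairList, List.mem_flatMap]
    refine ⟨((0 : Int) + k, nodes[k]), (PySem.List.mem_enumerate_iff _ _ _).2 ⟨k, hk, rfl⟩, ?_⟩
    simp only [zero_add]
    rw [PySem.List.slice_from_natCast]
    simp only [List.mem_map]
    refine ⟨nodes[j], ?_, by rw [hk1, hj2]⟩
    rw [List.mem_iff_getElem]
    exact ⟨j - k, by simp [List.length_drop]; omega, by rw [List.getElem_drop]; congr 1; omega⟩

-- no duplicates in B's candidate list over a strictly increasing node list
lemma nodup_pvPairList (nodes : List String) (hlt : nodes.Pairwise (· < ·)) :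
    (pvPairList nodes).Nodup := by
  have hnd : nodes.Nodup := hlt.imp (fun h => ne_of_lt h)
  have hget : ∀ (i j : Nat) (hi : i < nodes.length) (hj : j < nodes.length),
      i < j → nodes[i] < nodes[j] := by
    intro i j hi hj hij
    exact List.pairwise_iff_getElem.1 hlt i j hi hj hij
  rw [pvPairList, List.nodup_flatMap]
  constructor
  · rintro ⟨i, x⟩ hp
    obtain ⟨k, hk, hpe⟩ := (PySem.List.mem_enumerate_iff _ _ _).1 hp
    have hie : i = (0 : Int) + k ∧ x = nodes[k] := by
      constructor
      · exact congrArg Prod.fst hpe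
      · exact congrArg Prod.snd hpe
    obtain ⟨rfl, rfl⟩ := hie
    simp only [zero_add]
    rw [PySem.List.slice_from_natCast]
    exact (hnd.sublist (List.drop_sublist _ _)).map
      (fun u v h => congrArg Prod.snd h)
  · rw [List.pairwise_iff_getElem]
    intro a b ha hb hab
    simp only [PySem.List.length_enumerate] at ha hb
    rw [PySem.List.getElem_enumerate, PySem.List.getElem_enumerate]
    intro z hz1 hz2
    simp only [List.mem_map] at hz1 hz2
    obtain ⟨u, _, rfl⟩ := hz1
    obtain ⟨v, _, hv⟩ := hz2
    have hfst : nodes[b] = nodes[a] := congrArg Prod.fst hv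
    exact absurd hfst.symm (ne_of_lt (hget a b ha hb hab))

-- ===== VERDICT (by name: the statement is the Claim_ definition above) =====
theorem role_adjacency_counts_spec : Claim_equal_role_adjacency_counts := by
  intro mixed pent adj _
  unfold Spec_role_adjacency_counts
  simp only [role_adjacency_counts, role_adjacency_counts_alt]
  rw [A_fold_eq, B_fold_eq, foldl_bump, foldl_bumpB]
  set adjD : PySem.Dict String (List String) := PySem.Dict.mk adj with hadjD
  set role : PySem.Dict String String :=
    List.foldl (fun d n => d.insert n "pentagon_boundary")
      (List.foldl (fun d n => d.insert n "mixed") PySem.Dict.empty mixed) pent with hrole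
  set nodesSet : PySem.Set String := (PySem.Set.ofList mixed).union (PySem.Set.ofList pent)
    with hnodesSet
  set nodes : List String := PySem.List.sorted nodesSet (fun s => s) false with hnodesDef
  set pset : PySem.Set String := PySem.Set.ofList pent with hpset
  set LA := pvEdgeList role.keys role.contains adjD with hLA
  set NA := pvNew [] LA with hNA
  set PL := pvPairList nodes with hPL
  simp only [List.nil_append, zero_add]
  -- the node list is strictly increasing
  have hpermN : nodes.Perm nodesSet := PySem.List.sorted_perm _ _ _
  have hndS : nodesSet.Nodup := PySem.Set.nodup_union _ _ (PySem.Set.nodup_ofList mixed)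
  have hndN : nodes.Nodup := hpermN.nodup_iff.2 hndS
  have hle : nodes.Pairwise (fun a b : String => a ≤ b) := by
    simpa using PySem.List.sorted_pairwise nodesSet (fun s : String => s)
  have hlt : nodes.Pairwise (· < ·) :=
    (hle.and hndN).imp (fun h => lt_of_le_of_ne h.1 h.2)
  -- membership facts
  have hcontains : ∀ x, role.contains x = true ↔ (x ∈ mixed ∨ x ∈ pent) := by
    intro x
    rw [hrole, contains_const_fold, contains_const_fold]
    simp [PySem.Dict.contains_empty]
    exact Or.comm
  have hps : ∀ y, y ∈ pset ↔ y ∈ pent := by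
    intro y; rw [hpset]; exact PySem.Set.mem_ofList _ _
  have hnodesmem : ∀ x, x ∈ nodes ↔ (x ∈ mixed ∨ x ∈ pent) := by
    intro x
    rw [hpermN.mem_iff, hnodesSet, PySem.Set.mem_union]
    simp [PySem.Set.mem_ofList, hps]
  have hkeys : ∀ x, x ∈ role.keys ↔ x ∈ nodes := by
    intro x
    rw [← PySem.Dict.contains_iff_mem_keys, hcontains, hnodesmem]
  -- A's deduplicated edge list = B's candidate list filtered by the adjacency test
  have hmemLA : ∀ e, e ∈ LA ↔ (e ∈ PL ∧ pvCond adjD e = true) := by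
    intro e
    rw [hLA, mem_pvEdgeList, hPL, mem_pvPairList nodes hlt]
    constructor
    · rintro ⟨a, ha, b, hb, hr, rfl⟩
      have han : a ∈ nodes := (hkeys a).1 ha
      have hbn : b ∈ nodes := (hnodesmem b).2 ((hcontains b).1 hr)
      by_cases hab : a ≤ b
      · refine ⟨⟨by simpa [pvPairKey, hab] using han,
          by simpa [pvPairKey, hab] using hbn, by simpa [pvPairKey, hab]⟩, ?_⟩
        simp [pvCond, pvPairKey, hab, hb]
      · have hba : b ≤ a := le_of_not_ge hab
        refine ⟨⟨by simpa [pvPairKey, hab] using hbn,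
          by simpa [pvPairKey, hab] using han, by simpa [pvPairKey, hab] using hba⟩, ?_⟩
        simp [pvCond, pvPairKey, hab, hb]
    · rintro ⟨⟨h1, h2, hle12⟩, hcond⟩
      simp only [pvCond, decide_eq_true_eq] at hcond
      rcases hcond with hc | hc
      · refine ⟨e.1, (hkeys e.1).2 h1, e.2, hc,
          (hcontains e.2).2 ((hnodesmem e.2).1 h2), ?_⟩
        simp [pvPairKey, hle12]
      · refine ⟨e.2, (hkeys e.2).2 h2, e.1, hc,
          (hcontains e.1).2 ((hnodesmem e.1).1 h1), ?_⟩
        by_cases h21 : e.2 ≤ e.1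
        · have h12 : e.1 = e.2 := le_antisymm hle12 h21
          simp only [pvPairKey, if_pos h21]
          rw [Prod.ext_iff]
          exact ⟨h12, h12.symm⟩
        · simp [pvPairKey, h21]
    -- NA and the filtered candidate list are permutations of each other
  have hndPL : PL.Nodup := nodup_pvPairList nodes hlt
  have hperm : NA.Perm (PL.filter (pvCond adjD)) := by
    rw [List.perm_ext_iff_of_nodup (nodup_pvNew LA []) (hndPL.filter _)]
    intro e
    rw [mem_pvNew, List.mem_filter]
    simp [hmemLA e]
  -- role classification agrees with pentagon-set classification on role nodes
  have hgetD : ∀ x, role.getD x "" =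
      if x ∈ pent then "pentagon_boundary" else if x ∈ mixed then "mixed" else "" := by
    intro x
    rw [hrole, getD_const_fold, getD_const_fold, PySem.Dict.getD_empty]
  have hends : ∀ e ∈ NA, (e.1 ∈ mixed ∨ e.1 ∈ pent) ∧ (e.2 ∈ mixed ∨ e.2 ∈ pent) := by
    intro e he
    have := ((hmemLA e).1 ((mem_pvNew e LA []).1 he).1).1
    rw [hPL, mem_pvPairList nodes hlt] at this
    exact ⟨(hnodesmem e.1).1 this.1, (hnodesmem e.2).1 this.2.1⟩
  have hmix : ∀ e ∈ NA, decide (role.getD e.1 "" = "mixed" ∧ role.getD e.2 "" = "mixed")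
      = pvQm pset e := by
    intro e he
    obtain ⟨h1, h2⟩ := hends e he
    rw [hgetD, hgetD]
    simp only [pvQm]
    by_cases hp1 : e.1 ∈ pent <;> by_cases hp2 : e.2 ∈ pent
    · simp [hp1, hp2, hps]
    · have hm2 : e.2 ∈ mixed := h2.resolve_right hp2
      simp [hp1, hp2, hps, hm2]
    · have hm1 : e.1 ∈ mixed := h1.resolve_right hp1
      simp [hp1, hp2, hps, hm1]
    · have hm1 : e.1 ∈ mixed := h1.resolve_right hp1
      have hm2 : e.2 ∈ mixed := h2.resolve_right hp2
      simp [hp1, hp2, hps, hm1, hm2]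
  have hpent : ∀ e ∈ NA,
      decide (role.getD e.1 "" = "pentagon_boundary" ∧ role.getD e.2 "" = "pentagon_boundary")
      = pvQp pset e := by
    intro e he
    rw [hgetD, hgetD]
    simp only [pvQp]
    by_cases hp1 : e.1 ∈ pent <;> by_cases hp2 : e.2 ∈ pent
    · simp [hp1, hp2, hps]
    · simp [hp1, hp2, hps]
      split_ifs <;> simp
    · simp [hp1, hp2, hps]
      split_ifs <;> simp
    · obtain ⟨h1, _⟩ := hends e he
      have hm1 : e.1 ∈ mixed := h1.resolve_right hp1
      simp [hp1, hp2, hps, hm1]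
  -- turn each B-side count over PL into a count over NA
  have hcount : ∀ (q : String × String → Bool),
      List.countP (fun e => pvCond adjD e && q e) PL = List.countP q NA := by
    intro q
    rw [hperm.countP_eq q, List.countP_filter]
    exact List.countP_congr (fun e _ => by rw [Bool.and_comm])
  have hcm := hcount (pvQm pset)
  have hcp := hcount (pvQp pset)
  have hcc := hcount (fun e => !pvQm pset e && !pvQp pset e)
  simp only [Prod.mk.injEq]
  refine ⟨?_, ?_, ?_⟩
  · rw [hcm]; norm_cast
    exact List.countP_congr (fun e he => by rw [hmix e he])
  · rw [hcp]; norm_cast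
    exact List.countP_congr (fun e he => by rw [hpent e he])
  · rw [show (fun e => pvCond adjD e && !pvQm pset e && !pvQp pset e)
        = (fun e => pvCond adjD e && (!pvQm pset e && !pvQp pset e)) from
        funext (fun e => Bool.and_assoc ..)]
    rw [hcc]; norm_cast
    exact List.countP_congr (fun e he => by rw [hmix e he, hpent e he])
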